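-- pv_equiv track=rewrite | github.com/GTJasonMK/GetStock | app/services/search_service.py | _exclude_by_market
-- ===== SOURCE A (Python) =====
-- from typing import List, Dict, Any, Optional
--
-- def _exclude_by_market(stocks: List[Dict], excludes: List[str]) -> List[Dict]:
--     """排除指定市场的股票"""
--     filtered = []
--     for stock in stocks:
--         code = stock.get("stock_code", "")
--         excluded = False
--         for market in excludes:
--             if market == "cyb" and code.startswith("3"):
--                 excluded = True
--             elif market == "kcb" and code.startswith("68"):
--                 excluded = True
--             # 主板排除：6开头但不是68，或者0开头但不是3
--             elif market == "main" and (
--                 (code.startswith("6") and not code.startswith("68")) or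
--                 (code.startswith("0") and not code.startswith("3"))
--             ):
--                 excluded = True
--             elif market == "bj" and (code.startswith("4") or code.startswith("8")):
--                 excluded = True
--
--             if excluded:
--                 break
--
--         if not excluded:
--             filtered.append(stock)
--     return filtered
-- ===== SOURCE B (Python) =====
-- def _classify(code):
--     """Market tag of a stock code, or None."""
--     if code.startswith("3"):
--         return "cyb"
--     if code.startswith("68"):
--         return "kcb"
--     if code.startswith("6") or code.startswith("0"):
--         return "main"
--     if code.startswith("4") or code.startswith("8"):
--         return "bj"
--     return None
--
-- def _exclude_by_market(stocks, excludes):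
--     exclude_set = set(excludes)
--     return [s for s in stocks if _classify(s.get("stock_code", "")) not in exclude_set]
-- ===== Notes on version B (the rewrite author's own statement) =====
-- stated objective: faster
-- what changed: B classifies each code once into its market tag (cyb/kcb/main/bj/None) with a helper, builds set(excludes) once, and keeps stocks whose tag is not in the set, replacing A's per-stock scan of excludes with flag-and-break.
import Mathlib
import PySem

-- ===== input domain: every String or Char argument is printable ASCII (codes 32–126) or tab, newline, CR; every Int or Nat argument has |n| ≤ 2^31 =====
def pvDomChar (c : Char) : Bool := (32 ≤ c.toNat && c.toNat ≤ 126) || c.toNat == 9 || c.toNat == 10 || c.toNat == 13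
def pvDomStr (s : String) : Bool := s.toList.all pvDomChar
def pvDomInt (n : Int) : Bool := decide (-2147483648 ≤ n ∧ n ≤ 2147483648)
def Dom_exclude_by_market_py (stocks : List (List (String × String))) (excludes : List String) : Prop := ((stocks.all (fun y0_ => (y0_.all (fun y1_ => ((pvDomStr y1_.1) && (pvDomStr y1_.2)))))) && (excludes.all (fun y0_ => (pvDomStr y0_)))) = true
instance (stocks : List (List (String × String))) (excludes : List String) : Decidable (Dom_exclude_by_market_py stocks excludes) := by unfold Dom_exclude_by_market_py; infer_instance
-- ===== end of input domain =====

-- B replaces A's per-stock scan over excludes (flag + break) by one classification of the code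
-- into its market tag plus a single set-membership test; return value proved equal (idiomatic).

-- ===== PORT A =====
-- A's elif chain deciding whether `market` excludes `code`
def pvA_cond (market code : String) : Bool :=
  if market == "cyb" && PySem.Str.startswith code "3" then true
  else if market == "kcb" && PySem.Str.startswith code "68" then true
  else if market == "main" &&
      ((PySem.Str.startswith code "6" && !PySem.Str.startswith code "68") ||
       (PySem.Str.startswith code "0" && !PySem.Str.startswith code "3")) then true
  else if market == "bj" && (PySem.Str.startswith code "4" || PySem.Str.startswith code "8") then true
  else false

-- A's inner `for market in excludes` loop: the excluded flag with its early `break`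
def pvA_loop (code : String) : List String → Bool
  | [] => false
  | m :: rest => if pvA_cond m code then true else pvA_loop code rest

def exclude_by_market_py (stocks : List (List (String × String))) (excludes : List String) : List (List (String × String)) :=
  stocks.foldl (fun filtered stock =>
    if pvA_loop ((PySem.Dict.mk stock).getD "stock_code" "") excludes then filtered
    else filtered ++ [stock]) []

-- ===== PORT B =====
-- _classify from Source B
def pvClassify (code : String) : Option String :=
  if PySem.Str.startswith code "3" then some "cyb"
  else if PySem.Str.startswith code "68" then some "kcb"
  else if PySem.Str.startswith code "6" || PySem.Str.startswith code "0" then some "main"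
  else if PySem.Str.startswith code "4" || PySem.Str.startswith code "8" then some "bj"
  else none

def exclude_by_market_py_alt (stocks : List (List (String × String))) (excludes : List String) : List (List (String × String)) :=
  let exSet : PySem.Set String := PySem.Set.ofList excludes
  stocks.filter (fun s =>
    match pvClassify ((PySem.Dict.mk s).getD "stock_code" "") with
    | none => true
    | some t => !(PySem.Set.contains exSet t))

-- ===== PRECONDITION & SPEC =====
def Spec_exclude_by_market_py (stocks : List (List (String × String))) (excludes : List String) (out : List (List (String × String))) : Prop := out = exclude_by_market_py_alt stocks excludes
instance (stocks : List (List (String × String))) (excludes : List String) (out : List (List (String × String))) : Decidable (Spec_exclude_by_market_py stocks excludes out) := by unfold Spec_exclude_by_market_py; infer_instance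

-- ===== CLAIM (what is proved, stated in full; the proofs are below) =====
def Claim_equal_exclude_by_market_py : Prop := ∀ (stocks : List (List (String × String))) (excludes : List String), Dom_exclude_by_market_py stocks excludes → Spec_exclude_by_market_py stocks excludes (exclude_by_market_py stocks excludes)

-- ===== LEMMAS AND PROOFS =====

lemma sbeq_comm (a b : String) : (a == b) = (b == a) := by
  by_cases h : a = b
  · simp [h]
  · simp [h, Ne.symm h]

lemma cbeq_comm (a b : Char) : (a == b) = (b == a) := by
  by_cases h : a = b
  · simp [h]
  · simp [h, Ne.symm h]

lemma sdecide_eq_beq (a b : String) : decide (a = b) = (a == b) := by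
  by_cases h : a = b <;> simp [h]

-- core fact at the List Char level: A's per-market condition holds iff B's classification is that market
lemma cond_eq_classify_chars (m : String) (l : List Char) :
    (if m == "cyb" && PySem.Chars.startswith l "3".toList then true
     else if m == "kcb" && PySem.Chars.startswith l "68".toList then true
     else if m == "main" &&
        ((PySem.Chars.startswith l "6".toList && !PySem.Chars.startswith l "68".toList) ||
         (PySem.Chars.startswith l "0".toList && !PySem.Chars.startswith l "3".toList)) then true
     else if m == "bj" && (PySem.Chars.startswith l "4".toList || PySem.Chars.startswith l "8".toList) then true
     else false) =
    ((if PySem.Chars.startswith l "3".toList then some "cyb"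
      else if PySem.Chars.startswith l "68".toList then some "kcb"
      else if PySem.Chars.startswith l "6".toList || PySem.Chars.startswith l "0".toList then some "main"
      else if PySem.Chars.startswith l "4".toList || PySem.Chars.startswith l "8".toList then some "bj"
      else none) == some m) := by
  rcases l with _ | ⟨c, t⟩
  · simp [PySem.Chars.startswith]
  · have e3 : PySem.Chars.startswith (c :: t) "3".toList = (c == '3') := by
      simp [PySem.Chars.startswith, List.isPrefixOf, eq_comm]
    have e6 : PySem.Chars.startswith (c :: t) "6".toList = (c == '6') := by
      simp [PySem.Chars.startswith, List.isPrefixOf, eq_comm]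
    have e0 : PySem.Chars.startswith (c :: t) "0".toList = (c == '0') := by
      simp [PySem.Chars.startswith, List.isPrefixOf, eq_comm]
    have e4 : PySem.Chars.startswith (c :: t) "4".toList = (c == '4') := by
      simp [PySem.Chars.startswith, List.isPrefixOf, eq_comm]
    have e8 : PySem.Chars.startswith (c :: t) "8".toList = (c == '8') := by
      simp [PySem.Chars.startswith, List.isPrefixOf, eq_comm]
    have e68 : PySem.Chars.startswith (c :: t) "68".toList = ((c == '6') && PySem.Chars.startswith t "8".toList) := by
      simp [PySem.Chars.startswith, List.isPrefixOf, cbeq_comm]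
    rw [e3, e6, e0, e4, e8, e68]
    by_cases h3 : c = '3' <;> by_cases h6 : c = '6' <;> by_cases h0 : c = '0' <;>
      by_cases h4 : c = '4' <;> by_cases h8 : c = '8' <;>
      by_cases he : PySem.Chars.startswith t ['8'] = true <;>
        simp [h3, h6, h0, h4, h8, he, sbeq_comm, sdecide_eq_beq]

lemma cond_eq_classify (m code : String) : pvA_cond m code = (pvClassify code == some m) := by
  unfold pvA_cond pvClassify
  simp only [PySem.Str.startswith_eq]
  exact cond_eq_classify_chars m code.toList

-- A's flag-and-break loop computes membership of B's classification in the excludes list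
lemma loop_eq_classify (code : String) (ms : List String) :
    pvA_loop code ms = (match pvClassify code with
      | none => false
      | some t => ms.contains t) := by
  induction ms with
  | nil => cases pvClassify code <;> simp [pvA_loop]
  | cons m rest ih =>
      cases h : pvClassify code with
      | none => simp [pvA_loop, cond_eq_classify, h, ih]
      | some t =>
          simp [pvA_loop, cond_eq_classify, h, ih, sbeq_comm]
          by_cases hmt : m = t
          · simp [hmt]
          · simp [hmt, Ne.symm hmt]

-- ===== VERDICT (by name: the statement is the Claim_ definition above) =====
theorem exclude_by_market_py_spec : Claim_equal_exclude_by_market_py := by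
  intro stocks excludes _
  unfold Spec_exclude_by_market_py exclude_by_market_py exclude_by_market_py_alt
  have hfold := PySem.List.foldl_append_if
    (p := fun stock => !pvA_loop ((PySem.Dict.mk stock).getD "stock_code" "") excludes)
    (f := fun (s : List (String × String)) => s) (l := stocks) (acc := [])
  simp only [List.map_id'] at hfold
  have hfun : (fun (filtered : List (List (String × String))) stock =>
        if pvA_loop ((PySem.Dict.mk stock).getD "stock_code" "") excludes then filtered
        else filtered ++ [stock]) =
      (fun acc x => if (!pvA_loop ((PySem.Dict.mk x).getD "stock_code" "") excludes) = true
        then acc ++ [x] else acc) := by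
    funext acc s
    by_cases h : pvA_loop ((PySem.Dict.mk s).getD "stock_code" "") excludes <;> simp [h]
  calc stocks.foldl (fun filtered stock =>
        if pvA_loop ((PySem.Dict.mk stock).getD "stock_code" "") excludes then filtered
        else filtered ++ [stock]) []
      = stocks.filter (fun stock => !pvA_loop ((PySem.Dict.mk stock).getD "stock_code" "") excludes) := by
        rw [hfun, hfold]; simp
    _ = _ := by
        apply List.filter_congr
        intro s _
        rw [loop_eq_classify]
        cases pvClassify ((PySem.Dict.mk s).getD "stock_code" "") with
        | none => simp
        | some t => simp
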